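-- pv_equiv track=rewrite | github.com/Doldolee/MORE-CLEAR | dataset/util.py | bg_stack_next_note
-- ===== SOURCE A (Python) =====
-- from typing import List, Union
--
-- def bg_stack_next_note(
--     next_notes: List[str],
--     done: List[Union[bool, int]],
--     sep: str = ' | ',
--     missing: str = 'no clinical note'
-- ) -> List[str]:
--     """
--     Episode-aware stacking for next_notes, including only t-1 and t-2 within the same episode.
--     """
--     stacked = []
--     first_valid = None
--     last_reset = -1
--
--     for i, (nxt, flag) in enumerate(zip(next_notes, done)):
--         flag = bool(flag)
--         is_first = False
--
--         # Detect first valid note in episode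
--         if first_valid is None and nxt != missing:
--             first_valid = nxt
--             is_first = True
--
--         # Collect t-2, t-1 valid notes within current episode
--         suffix = []
--         for idx in (i-2, i-1):
--             if idx > last_reset and 0 <= idx < len(next_notes):
--                 prev = next_notes[idx]
--                 if prev != missing and prev != first_valid and prev not in suffix:
--                     suffix.append(prev)
--
--         # Build output
--         if first_valid is None:
--             out = nxt
--         else:
--             if is_first:
--                 out = f"[current status] {nxt}"
--             else:
--                 prefix = f"[background] {first_valid}"
--                 if suffix:
--                     prefix += sep + sep.join(suffix)
--                 if nxt != missing:
--                     out = f"{prefix} || [current status] {nxt}"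
--                 else:
--                     out = prefix
--
--         stacked.append(out)
--
--         # Reset at episode boundary
--         if flag:
--             first_valid = None
--             last_reset = i
--
--     return stacked
-- ===== SOURCE B (Python) =====
-- from typing import List, Union
--
-- def bg_stack_next_note(
--     next_notes: List[str],
--     done: List[Union[bool, int]],
--     sep: str = ' | ',
--     missing: str = 'no clinical note'
-- ) -> List[str]:
--     """Episode partition first, then render each episode locally."""
--     episodes, cur = [], []
--     for nxt, flag in zip(next_notes, done):
--         cur.append(nxt)
--         if flag:
--             episodes.append(cur)
--             cur = []
--     if cur:
--         episodes.append(cur)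
--
--     out = []
--     for ep in episodes:
--         k = next((j for j, x in enumerate(ep) if x != missing), None)
--         for j, nxt in enumerate(ep):
--             if k is None or j < k:
--                 out.append(nxt)
--             elif j == k:
--                 out.append(f"[current status] {nxt}")
--             else:
--                 fv = ep[k]
--                 suffix = []
--                 for p in ep[max(j - 2, 0):j]:
--                     if p != missing and p != fv and p not in suffix:
--                         suffix.append(p)
--                 prefix = f"[background] {fv}"
--                 if suffix:
--                     prefix += sep + sep.join(suffix)
--                 out.append(f"{prefix} || [current status] {nxt}" if nxt != missing else prefix)
--     return out
-- ===== Notes on version B (the rewrite author's own statement) =====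
-- stated objective: alternative
-- what changed: A's single stateful pass (first_valid/last_reset state plus global-index lookback into next_notes) is replaced by a two-phase decomposition: first partition zip(next_notes, done) into episodes at truthy done flags, then render each episode locally from its own first valid note and episode-local two-note lookback.
import Mathlib
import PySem

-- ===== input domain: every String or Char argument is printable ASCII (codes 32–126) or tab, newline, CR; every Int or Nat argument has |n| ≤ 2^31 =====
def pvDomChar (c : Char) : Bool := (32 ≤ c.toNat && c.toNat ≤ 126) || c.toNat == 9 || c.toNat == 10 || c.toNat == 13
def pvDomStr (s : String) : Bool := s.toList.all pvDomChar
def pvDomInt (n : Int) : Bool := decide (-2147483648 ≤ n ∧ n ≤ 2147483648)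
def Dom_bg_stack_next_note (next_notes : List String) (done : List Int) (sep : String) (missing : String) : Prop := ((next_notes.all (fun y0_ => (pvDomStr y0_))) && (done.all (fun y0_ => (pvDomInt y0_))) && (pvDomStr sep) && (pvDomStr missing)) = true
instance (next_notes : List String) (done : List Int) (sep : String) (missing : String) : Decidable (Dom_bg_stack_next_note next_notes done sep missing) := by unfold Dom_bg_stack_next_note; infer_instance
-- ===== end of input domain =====

-- B replaces A's single stateful pass (first_valid/last_reset + global index lookback) by a
-- different decomposition: partition the zipped notes into episodes first, then render each
-- episode locally (objective: alternative structure, same cost).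

-- ===== PORT A =====
-- inner `for idx in (i-2, i-1)` loop; nn[idx] is read as nn.getD idx.toNat "" — exact, since the
-- guard 0 ≤ idx < len(nn) makes the index valid
def pvA_suffix (nn : List String) (missing : String) (fv : Option String) (lr : Int) (i : Nat) : List String :=
  [((i : Int) - 2), ((i : Int) - 1)].foldl (fun suffix idx =>
    if lr < idx ∧ 0 ≤ idx ∧ idx < (nn.length : Int) then
      let prev := nn.getD idx.toNat ""
      if prev ≠ missing ∧ some prev ≠ fv ∧ prev ∉ suffix then suffix ++ [prev] else suffix
    else suffix) []

-- A's "Build output" block (first_valid : Option String; `prev != first_valid` with None is always true)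
def pvOut (sep missing : String) (fv' : Option String) (is_first : Bool) (suffix : List String) (nxt : String) : String :=
  match fv' with
  | none => nxt
  | some v =>
    if is_first then "[current status] " ++ nxt
    else
      let pre1 := "[background] " ++ v
      let pre2 := if suffix ≠ [] then pre1 ++ sep ++ PySem.Str.join sep suffix else pre1
      if nxt ≠ missing then pre2 ++ " || [current status] " ++ nxt else pre2

-- A's main loop over enumerate(zip(next_notes, done)) with state (first_valid, last_reset)
def pvA_loop (nn : List String) (sep missing : String) : List (String × Int) → Nat → Option String → Int → List String
  | [], _, _, _ => []
  | (nxt, flag) :: rest, i, fv, lr =>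
    let p : Option String × Bool :=
      if fv = none ∧ nxt ≠ missing then (some nxt, true) else (fv, false)
    pvOut sep missing p.1 p.2 (pvA_suffix nn missing p.1 lr i) nxt ::
      (if flag ≠ 0 then pvA_loop nn sep missing rest (i + 1) none (i : Int)
       else pvA_loop nn sep missing rest (i + 1) p.1 lr)

def bg_stack_next_note (next_notes : List String) (done : List Int) (sep : String) (missing : String) : List String :=
  pvA_loop next_notes sep missing (next_notes.zip done) 0 none (-1)

-- ===== PORT B =====
-- episode partition: each episode ends at (and includes) an index with a truthy done flag
def pvB_splitEp : List (String × Int) → List String → List (List String)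
  | [], cur => if cur ≠ [] then [cur] else []
  | (nxt, flag) :: rest, cur =>
    if flag ≠ 0 then (cur ++ [nxt]) :: pvB_splitEp rest [] else pvB_splitEp rest (cur ++ [nxt])

-- `for p in ep[max(j-2,0):j]` dedup/filter loop
def pvB_suffix (ep : List String) (missing fv : String) (j : Int) : List String :=
  (PySem.List.slice ep (some (max (j - 2) 0)) (some j)).foldl
    (fun suffix p => if p ≠ missing ∧ p ≠ fv ∧ p ∉ suffix then suffix ++ [p] else suffix) []

-- per-position rendering; ep[k] is read as ep.getD k "" — exact, since k comes from findIdx?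
def pvB_at (sep missing : String) (ep : List String) (k? : Option Nat) (j : Int) (nxt : String) : String :=
  match k? with
  | none => nxt
  | some k =>
    if j < (k : Int) then nxt
    else if j = (k : Int) then "[current status] " ++ nxt
    else
      let fv := ep.getD k ""
      let suffix := pvB_suffix ep missing fv j
      let pre1 := "[background] " ++ fv
      let pre2 := if suffix ≠ [] then pre1 ++ sep ++ PySem.Str.join sep suffix else pre1
      if nxt ≠ missing then pre2 ++ " || [current status] " ++ nxt else pre2

def pvB_render (sep missing : String) (ep : List String) : List String :=
  let k? := List.findIdx? (fun x => x != missing) ep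
  (PySem.List.enumerate ep 0).map (fun q => pvB_at sep missing ep k? q.1 q.2)

def bg_stack_next_note_alt (next_notes : List String) (done : List Int) (sep : String) (missing : String) : List String :=
  ((pvB_splitEp (next_notes.zip done) []).map (pvB_render sep missing)).flatten

-- ===== PRECONDITION & SPEC =====
def Spec_bg_stack_next_note (next_notes : List String) (done : List Int) (sep : String) (missing : String) (out : List String) : Prop := out = bg_stack_next_note_alt next_notes done sep missing
instance (next_notes : List String) (done : List Int) (sep : String) (missing : String) (out : List String) : Decidable (Spec_bg_stack_next_note next_notes done sep missing out) := by unfold Spec_bg_stack_next_note; infer_instance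

-- ===== CLAIM (what is proved, stated in full; the proofs are below) =====
def Claim_equal_bg_stack_next_note : Prop := ∀ (next_notes : List String) (done : List Int) (sep : String) (missing : String), Dom_bg_stack_next_note next_notes done sep missing → Spec_bg_stack_next_note next_notes done sep missing (bg_stack_next_note next_notes done sep missing)

-- ===== LEMMAS AND PROOFS =====

-- episode-local intermediate loop: A's loop with the two lookback notes carried in the state
def pvLocalSuffix (missing : String) (fv : Option String) (h2 h1 : Option String) : List String :=
  [h2, h1].foldl (fun suffix o =>
    match o with
    | none => suffix
    | some p => if p ≠ missing ∧ some p ≠ fv ∧ p ∉ suffix then suffix ++ [p] else suffix) []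

def pvLocal (sep missing : String) : List (String × Int) → Option String → Option String → Option String → List String
  | [], _, _, _ => []
  | (nxt, flag) :: rest, fv, h2, h1 =>
    let p : Option String × Bool :=
      if fv = none ∧ nxt ≠ missing then (some nxt, true) else (fv, false)
    pvOut sep missing p.1 p.2 (pvLocalSuffix missing p.1 h2 h1) nxt ::
      (if flag ≠ 0 then pvLocal sep missing rest none none none
       else pvLocal sep missing rest p.1 h1 (some nxt))

def pvh1 (nn : List String) (i : Nat) (lr : Int) : Option String :=
  if 0 < i ∧ lr < (i : Int) - 1 then some (nn.getD (i - 1) "") else none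

def pvh2 (nn : List String) (i : Nat) (lr : Int) : Option String :=
  if 1 < i ∧ lr < (i : Int) - 2 then some (nn.getD (i - 2) "") else none

lemma pv_suffix_link (nn : List String) (missing : String) (fv : Option String) (i : Nat) (lr : Int)
    (hi : i < nn.length) :
    pvA_suffix nn missing fv lr i = pvLocalSuffix missing fv (pvh2 nn i lr) (pvh1 nn i lr) := by
  have t2 : ((i : Int) - 2).toNat = i - 2 := by omega
  have t1 : ((i : Int) - 1).toNat = i - 1 := by omega
  simp only [pvA_suffix, pvLocalSuffix, pvh1, pvh2, List.foldl_cons, List.foldl_nil, t2, t1]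
  by_cases c2 : 1 < i ∧ lr < (i : Int) - 2 <;> by_cases c1 : 0 < i ∧ lr < (i : Int) - 1
  · rw [if_pos (show lr < (i : Int) - 2 ∧ 0 ≤ (i : Int) - 2 ∧ (i : Int) - 2 < (nn.length : Int) by omega),
        if_pos (show lr < (i : Int) - 1 ∧ 0 ≤ (i : Int) - 1 ∧ (i : Int) - 1 < (nn.length : Int) by omega),
        if_pos c2, if_pos c1]
  · exact (c1 ⟨by omega, by omega⟩).elim
  · rw [if_neg (show ¬(lr < (i : Int) - 2 ∧ 0 ≤ (i : Int) - 2 ∧ (i : Int) - 2 < (nn.length : Int)) by omega),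
        if_pos (show lr < (i : Int) - 1 ∧ 0 ≤ (i : Int) - 1 ∧ (i : Int) - 1 < (nn.length : Int) by omega),
        if_neg c2, if_pos c1]
  · rw [if_neg (show ¬(lr < (i : Int) - 2 ∧ 0 ≤ (i : Int) - 2 ∧ (i : Int) - 2 < (nn.length : Int)) by omega),
        if_neg (show ¬(lr < (i : Int) - 1 ∧ 0 ≤ (i : Int) - 1 ∧ (i : Int) - 1 < (nn.length : Int)) by omega),
        if_neg c2, if_neg c1]

lemma pv_stage1 (nn : List String) (d : List Int) (sep missing : String) :
    ∀ (pairs : List (String × Int)) (i : Nat) (fv : Option String) (lr : Int),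
      pairs = (nn.zip d).drop i → lr < (i : Int) →
      pvA_loop nn sep missing pairs i fv lr = pvLocal sep missing pairs fv (pvh2 nn i lr) (pvh1 nn i lr) := by
  intro pairs
  induction pairs with
  | nil => intro i fv lr _ _; rfl
  | cons hd rest ih =>
    obtain ⟨nxt, flag⟩ := hd
    intro i fv lr hp hlr
    have hlen : i < (nn.zip d).length := by
      by_contra h
      push_neg at h
      rw [List.drop_eq_nil_of_le h] at hp
      exact List.cons_ne_nil _ _ hp
    have hinn : i < nn.length := by
      rw [List.length_zip] at hlen; omega
    rw [List.drop_eq_getElem_cons hlen] at hp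
    injection hp with hhd htl
    rw [List.getElem_zip] at hhd
    have hnxt : nxt = nn[i] := congrArg Prod.fst hhd
    simp only [pvA_loop, pvLocal]
    rw [pv_suffix_link nn missing _ i lr hinn]
    congr 1
    by_cases hf : flag ≠ 0
    · rw [if_pos hf, if_pos hf, ih (i + 1) none (i : Int) (by rw [htl]) (by push_cast; omega)]
      have e2 : pvh2 nn (i + 1) (i : Int) = none := by
        unfold pvh2; rw [if_neg (by push_cast; omega)]
      have e1 : pvh1 nn (i + 1) (i : Int) = none := by
        unfold pvh1; rw [if_neg (by push_cast; omega)]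
      rw [e2, e1]
    · rw [if_neg hf, if_neg hf, ih (i + 1) _ lr (by rw [htl]) (by push_cast; omega)]
      have e2 : pvh2 nn (i + 1) lr = pvh1 nn i lr := by
        unfold pvh2 pvh1
        have hc : (1 < i + 1 ∧ lr < ((i : Nat) + 1 : Int) - 2) ↔ (0 < i ∧ lr < (i : Int) - 1) := by omega
        have hv : i + 1 - 2 = i - 1 := by omega
        simp only [Nat.cast_add, Nat.cast_one, hc, hv]
      have e1 : pvh1 nn (i + 1) lr = some nxt := by
        unfold pvh1
        rw [if_pos (by push_cast; omega)]
        rw [hnxt]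
        congr 1
        simp [List.getD_eq_getElem?_getD, List.getElem?_eq_getElem hinn]
      rw [e2, e1]

lemma pv_splitEp_shape : ∀ (pairs : List (String × Int)) (cur : List String), cur ≠ [] →
    ∃ chunk eps, pvB_splitEp pairs cur = (cur ++ chunk) :: eps := by
  intro pairs
  induction pairs with
  | nil =>
    intro cur hc
    exact ⟨[], [], by simp [pvB_splitEp, hc]⟩
  | cons hd rest ih =>
    obtain ⟨x, fl⟩ := hd
    intro cur hc
    by_cases hf : fl ≠ 0
    · exact ⟨[x], pvB_splitEp rest [], by simp [pvB_splitEp, hf]⟩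
    · obtain ⟨c', e', h'⟩ := ih (cur ++ [x]) (by simp)
      exact ⟨x :: c', e', by simp [pvB_splitEp, hf, h']⟩

lemma pv_find_concat (missing nxt : String) (cur : List String) :
    (cur ++ [nxt]).find? (fun x => x != missing) =
      (if cur.find? (fun x => x != missing) = none ∧ nxt ≠ missing then (some nxt, true)
       else (cur.find? (fun x => x != missing), false)).1 := by
  rcases hfv : cur.find? (fun x => x != missing) with _ | v
  · by_cases hm : nxt = missing
    · simp [List.find?_append, hfv, hm]
    · simp [List.find?_append, hfv, hm]
  · simp [List.find?_append, hfv]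

lemma pv_suffix_eq (missing v nxt : String) (cur tail : List String) :
    pvLocalSuffix missing (some v) cur.dropLast.getLast? cur.getLast? =
      pvB_suffix (cur ++ nxt :: tail) missing v (cur.length : Int) := by
  rcases hr : cur.reverse with _ | ⟨y, rest⟩
  · have hc : cur = [] := by simpa using congrArg List.reverse hr
    subst hc
    have h0 : PySem.List.slice (nxt :: tail) none (some (0 : Int)) = ([] : List String) := by
      rw [PySem.List.slice_to _ (by norm_num)]
      rfl
    simp [pvLocalSuffix, pvB_suffix, h0]
  · rcases rest with _ | ⟨x, t⟩
    · have hc : cur = [y] := by simpa using congrArg List.reverse hr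
      subst hc
      have h1 : PySem.List.slice (y :: nxt :: tail) none (some (1 : Int)) = [y] := by
        rw [PySem.List.slice_to _ (by norm_num)]
        rfl
      simp [pvLocalSuffix, pvB_suffix, h1]
    · have hc : cur = t.reverse ++ [x, y] := by
        have := congrArg List.reverse hr
        simpa using this
      subst hc
      have hl : (t.reverse ++ [x, y]).length = t.length + 2 := by simp
      have hsl : PySem.List.slice ((t.reverse ++ [x, y]) ++ nxt :: tail)
          (some (max (((t.reverse ++ [x, y]).length : Int) - 2) 0)) (some ((t.reverse ++ [x, y]).length : Int)) = [x, y] := by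
        have hm : (max (((t.reverse ++ [x, y]).length : Int) - 2) 0) = ((t.length : Nat) : Int) := by
          rw [hl]; omega
        have hb : (((t.reverse ++ [x, y]).length : Nat) : Int) = ((t.length + 2 : Nat) : Int) := by
          rw [hl]
        rw [hm, hb, PySem.List.slice_natCast]
        have hre : (t.reverse ++ [x, y]) ++ nxt :: tail = t.reverse ++ (x :: y :: nxt :: tail) := by
          simp
        rw [hre]
        have hd : List.drop t.length (t.reverse ++ (x :: y :: nxt :: tail)) = x :: y :: nxt :: tail := by
          have := List.drop_left (l₁ := t.reverse) (l₂ := x :: y :: nxt :: tail)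
          simpa using this
        rw [hd]
        simp
      have hgl : ((t.reverse ++ [x, y])).getLast? = some y := by
        have : t.reverse ++ [x, y] = (t.reverse ++ [x]) ++ [y] := by simp
        rw [this, List.getLast?_concat]
      have hdl : ((t.reverse ++ [x, y])).dropLast.getLast? = some x := by
        have h' : t.reverse ++ [x, y] = (t.reverse ++ [x]) ++ [y] := by simp
        rw [h', List.dropLast_concat, List.getLast?_concat]
      simp only [pvB_suffix, hsl, pvLocalSuffix, hgl, hdl, List.foldl_cons, List.foldl_nil]
      simp

lemma pv_out_at (sep missing nxt : String) (cur tail : List String) :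
    pvOut sep missing
      (if cur.find? (fun x => x != missing) = none ∧ nxt ≠ missing then ((some nxt : Option String), true)
       else (cur.find? (fun x => x != missing), false)).1
      (if cur.find? (fun x => x != missing) = none ∧ nxt ≠ missing then ((some nxt : Option String), true)
       else (cur.find? (fun x => x != missing), false)).2
      (pvLocalSuffix missing
        (if cur.find? (fun x => x != missing) = none ∧ nxt ≠ missing then ((some nxt : Option String), true)
         else (cur.find? (fun x => x != missing), false)).1
        cur.dropLast.getLast? cur.getLast?) nxt =
    pvB_at sep missing (cur ++ nxt :: tail)
      (List.findIdx? (fun x => x != missing) (cur ++ nxt :: tail)) (cur.length : Int) nxt := by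
  rcases hfv : cur.find? (fun x => x != missing) with _ | v
  · -- no valid note yet in the current episode prefix
    have hidx : List.findIdx? (fun x => x != missing) cur = none := by
      rw [List.findIdx?_eq_none_iff]
      intro x hx
      have := List.find?_eq_none.mp hfv x hx
      simpa using this
    rw [List.findIdx?_append, hidx, Option.none_or]
    by_cases hm : nxt = missing
    · have hx : (nxt != missing) = false := by simp [hm]
      rw [List.findIdx?_cons]
      simp only [hx, Bool.false_eq_true, if_false, Option.map_map]
      have key : ∀ o : Option Nat, (∀ m, o = some m → cur.length < m) →
          pvB_at sep missing (cur ++ nxt :: tail) o (cur.length : Int) nxt = nxt := by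
        intro o ho
        rcases o with _ | k
        · rfl
        · have hk := ho k rfl
          simp [pvB_at, show (cur.length : Int) < (k : Int) by exact_mod_cast hk]
      rw [key _ ?side]
      · rw [if_neg (by simp [hm])]
        rfl
      · intro m hmm
        obtain ⟨a, _, hae⟩ := Option.map_eq_some_iff.mp hmm
        simp only [Function.comp] at hae
        omega
    · have hx : (nxt != missing) = true := by simpa using hm
      rw [List.findIdx?_cons, if_pos hx]
      simp only [Option.map_some, Nat.zero_add]
      simp [pvOut, pvB_at, hm]
  · -- first valid note v found at index k < cur.length
    have hne : ¬((some v : Option String) = none ∧ nxt ≠ missing) := by simp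
    obtain ⟨hpv, k, hk, hkv, hmin⟩ := List.find?_eq_some_iff_getElem.mp hfv
    have hidx : List.findIdx? (fun x => x != missing) cur = some k :=
      List.findIdx?_eq_some_iff_getElem.mpr ⟨hk, by rw [hkv]; exact hpv, fun j hj => by simpa using hmin j hj⟩
    rw [List.findIdx?_append, hidx, Option.some_or, if_neg hne]
    have hglt : ¬((cur.length : Int) < (k : Int)) := by omega
    have hgeq : ¬((cur.length : Int) = (k : Int)) := by omega
    have hk' : k < (cur ++ nxt :: tail).length := by simp; omega
    have hget : (cur ++ nxt :: tail)[k]?.getD "" = v := by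
      rw [List.getElem?_eq_getElem hk', List.getElem_append_left hk]
      simp [hkv]
    simp [pvOut, pvB_at, hglt, hgeq, hget, pv_suffix_eq missing v nxt cur tail]

lemma pv_stage2 (sep missing : String) :
    ∀ (pairs : List (String × Int)) (cur : List String),
      pvLocal sep missing pairs (cur.find? (fun x => x != missing)) cur.dropLast.getLast? cur.getLast? =
        (((pvB_splitEp pairs cur).map (pvB_render sep missing)).flatten).drop cur.length := by
  intro pairs
  induction pairs with
  | nil =>
    intro cur
    by_cases hc : cur = []
    · subst hc; rfl
    · have hlen : (pvB_render sep missing cur).length = cur.length := by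
        simp [pvB_render, PySem.List.length_enumerate]
      simp only [pvLocal, pvB_splitEp, if_pos hc, List.map_cons, List.map_nil, List.flatten_cons,
        List.flatten_nil, List.append_nil]
      rw [List.drop_eq_nil_of_le (by omega)]
  | cons hd rest ih =>
    obtain ⟨nxt, flag⟩ := hd
    intro cur
    have hlenr : ∀ ep : List String, (pvB_render sep missing ep).length = ep.length := by
      intro ep; simp [pvB_render, PySem.List.length_enumerate]
    by_cases hf : flag ≠ 0
    · simp only [pvLocal, pvB_splitEp, if_pos hf, List.map_cons, List.flatten_cons]
      rw [List.drop_append_of_le_length (by rw [hlenr]; simp)]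
      have hlt : cur.length < (pvB_render sep missing (cur ++ [nxt])).length := by
        rw [hlenr]; simp
      rw [List.drop_eq_getElem_cons hlt]
      have hdrop : List.drop (cur.length + 1) (pvB_render sep missing (cur ++ [nxt])) = [] := by
        rw [List.drop_eq_nil_of_le]; rw [hlenr]; simp
      rw [hdrop]
      congr 1
      · have hk : cur.length < (PySem.List.enumerate (cur ++ [nxt]) 0).length := by
          rw [PySem.List.length_enumerate]; simp
        simp only [pvB_render, List.getElem_map, PySem.List.getElem_enumerate]
        have hel : (cur ++ [nxt])[cur.length]'(by simp) = nxt := List.getElem_concat_length rfl _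
        rw [pv_out_at sep missing nxt cur []]
        simp [hel]
      · have := ih []
        simpa [pvLocal] using this
    · simp only [pvLocal, pvB_splitEp, if_neg hf]
      obtain ⟨chunk, eps, hsh⟩ := pv_splitEp_shape rest (cur ++ [nxt]) (by simp)
      have hsh' : pvB_splitEp rest (cur ++ [nxt]) = (cur ++ nxt :: chunk) :: eps := by
        rw [hsh]; simp
      rw [hsh']
      simp only [List.map_cons, List.flatten_cons]
      have hlt : cur.length < ((pvB_render sep missing (cur ++ nxt :: chunk)) ++
          (eps.map (pvB_render sep missing)).flatten).length := by
        rw [List.length_append, hlenr]; simp; omega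
      rw [List.drop_eq_getElem_cons hlt]
      congr 1
      · have hlt2 : cur.length < (pvB_render sep missing (cur ++ nxt :: chunk)).length := by
          rw [hlenr]; simp
        rw [List.getElem_append_left hlt2]
        simp only [pvB_render, List.getElem_map, PySem.List.getElem_enumerate, zero_add]
        have hel : (cur ++ nxt :: chunk)[cur.length]'(by simp) = nxt := by
          rw [List.getElem_append_right (Nat.le_refl _)]
          simp
        rw [pv_out_at sep missing nxt cur chunk]
        congr 1
        exact hel.symm
      · rw [← pv_find_concat missing nxt cur]
        have hih := ih (cur ++ [nxt])
        rw [hsh'] at hih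
        simp only [List.map_cons, List.flatten_cons, List.length_append, List.length_cons,
          List.length_nil] at hih
        rw [List.dropLast_concat, List.getLast?_concat] at hih
        simpa using hih

-- ===== VERDICT (by name: the statement is the Claim_ definition above) =====
theorem bg_stack_next_note_spec : Claim_equal_bg_stack_next_note := by
  intro nn d sep missing _hd
  unfold Spec_bg_stack_next_note bg_stack_next_note bg_stack_next_note_alt
  rw [pv_stage1 nn d sep missing (nn.zip d) 0 none (-1) (by simp) (by norm_num)]
  have h2 : pvh2 nn 0 (-1) = none := by unfold pvh2; rw [if_neg (by omega)]
  have h1 : pvh1 nn 0 (-1) = none := by unfold pvh1; rw [if_neg (by omega)]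
  rw [h2, h1]
  have := pv_stage2 sep missing (nn.zip d) []
  simpa using this
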